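-- pv_equiv track=rewrite | github.com/vaibhav-jain-dev/learning-algo | problems/200-must-solve/arrays/10-monotonic-array/similar/02-minimum-removals-monotonic/python_code.py | min_removals_for_monotonic
-- ===== SOURCE A (Python) =====
-- from typing import List
--
-- def min_removals_for_monotonic(array: List[int]) -> int:
--     """
--     Find minimum removals to make array monotonic.
--
--     Strategy: Find longest monotonic subsequence (LMS), return n - LMS.
--
--     We find both:
--     - Longest Non-Decreasing Subsequence (LNDS)
--     - Longest Non-Increasing Subsequence (LNIS)
--     And take the maximum.
--
--     Visual for [1, 3, 2, 4, 5, 3]: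
--         LNDS = 4 ([1, 2, 4, 5])
--         LNIS = 3 ([3, 3] wait, need [3, 2] from different positions)
--         Actually LNIS = 2 ([3, 3] or [3, 2])
--         Answer = 6 - 4 = 2
--     """
--     if len(array) <= 1:
--         return 0
--
--     n = len(array)
--
--     # Find LNDS (Longest Non-Decreasing Subsequence)
--     dp_inc = [1] * n
--     for i in range(1, n):
--         for j in range(i):
--             if array[i] >= array[j]:
--                 dp_inc[i] = max(dp_inc[i], dp_inc[j] + 1)
--
--     # Find LNIS (Longest Non-Increasing Subsequence)
--     dp_dec = [1] * n
--     for i in range(1, n):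
--         for j in range(i):
--             if array[i] <= array[j]:
--                 dp_dec[i] = max(dp_dec[i], dp_dec[j] + 1)
--
--     longest_monotonic = max(max(dp_inc), max(dp_dec))
--     return n - longest_monotonic
-- ===== SOURCE B (Python) =====
-- from typing import List
-- from bisect import bisect_right
--
-- def min_removals_for_monotonic(array: List[int]) -> int:
--     """Patience sorting: O(n log n) longest non-decreasing subsequence,
--     run on the array and on its negation (for the non-increasing case)."""
--     if not array:
--         return 0
--
--     def lnds(xs):
--         # tails[k] = smallest possible tail of a non-decreasing subsequence of length k+1
--         tails = []
--         for x in xs: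
--             p = bisect_right(tails, x)
--             if p == len(tails):
--                 tails.append(x)
--             else:
--                 tails[p] = x
--         return len(tails)
--
--     return len(array) - max(lnds(array), lnds([-v for v in array]))
-- ===== Notes on version B (the rewrite author's own statement) =====
-- stated objective: faster
-- what changed: Replaces A's two O(n^2) nested-loop DP passes (longest non-decreasing and non-increasing subsequence) with patience sorting: a single bisect-based tails pass run on the array and on its negation.
import Mathlib
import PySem

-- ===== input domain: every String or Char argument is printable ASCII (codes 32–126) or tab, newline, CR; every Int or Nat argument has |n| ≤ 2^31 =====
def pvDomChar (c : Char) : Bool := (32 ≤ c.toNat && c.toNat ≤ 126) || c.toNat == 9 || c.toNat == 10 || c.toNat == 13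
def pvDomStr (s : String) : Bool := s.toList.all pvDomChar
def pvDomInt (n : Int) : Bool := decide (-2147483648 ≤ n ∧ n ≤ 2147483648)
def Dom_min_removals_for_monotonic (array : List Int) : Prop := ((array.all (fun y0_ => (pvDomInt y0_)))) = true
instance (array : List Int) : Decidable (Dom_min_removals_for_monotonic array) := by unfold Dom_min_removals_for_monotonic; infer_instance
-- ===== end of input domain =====

-- B replaces A's two O(n^2) dynamic-programming passes with patience sorting (bisect on the
-- tails list) run on the array and on its negation: same exact answer, O(n log n).

-- ===== PORT A =====
-- array[i]: every index used below is produced by range(...) and is in range, so the default is never taken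
def pvIdx (xs : List Int) (i : Nat) : Int := xs.getD i 0

def min_removals_for_monotonic (array : List Int) : Int :=
  if array.length ≤ 1 then 0
  else
    let n := array.length
    -- dp_inc: for i in range(1, n): for j in range(i): if array[i] >= array[j] ...
    let dp_inc := (List.range' 1 (n - 1)).foldl (fun dp i =>
      (List.range i).foldl (fun dp j =>
        if pvIdx array i ≥ pvIdx array j then
          dp.set i (max (dp.getD i 0) (dp.getD j 0 + 1))
        else dp) dp) (List.replicate n (1 : Int))
    -- dp_dec: same loops with array[i] <= array[j]
    let dp_dec := (List.range' 1 (n - 1)).foldl (fun dp i =>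
      (List.range i).foldl (fun dp j =>
        if pvIdx array i ≤ pvIdx array j then
          dp.set i (max (dp.getD i 0) (dp.getD j 0 + 1))
        else dp) dp) (List.replicate n (1 : Int))
    -- max(max(dp_inc), max(dp_dec)); both lists are nonempty here (n ≥ 2)
    let longest := max ((PySem.List.max? dp_inc (fun v => v)).getD 0)
                       ((PySem.List.max? dp_dec (fun v => v)).getD 0)
    (n : Int) - longest

-- ===== PORT B =====
-- bisect.bisect_right(tails, x) on a sorted list = number of elements ≤ x (exact on sorted input)
def pvBisectRight (tails : List Int) (x : Int) : Nat := tails.countP (fun v => decide (v ≤ x))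

def pvTails (xs : List Int) : List Int :=
  xs.foldl (fun tails x =>
    let p := pvBisectRight tails x
    if p = tails.length then tails ++ [x] else tails.set p x) []

-- length of a longest non-decreasing subsequence, patience style
def pvLnds (xs : List Int) : Nat := (pvTails xs).length

def min_removals_for_monotonic_alt (array : List Int) : Int :=
  if array.length = 0 then 0
  else (array.length : Int) - ((max (pvLnds array) (pvLnds (array.map (fun v => -v))) : Nat) : Int)

-- ===== PRECONDITION & SPEC =====
def Spec_min_removals_for_monotonic (array : List Int) (out : Int) : Prop := out = min_removals_for_monotonic_alt array
instance (array : List Int) (out : Int) : Decidable (Spec_min_removals_for_monotonic array out) := by unfold Spec_min_removals_for_monotonic; infer_instance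

-- ===== CLAIM (what is proved, stated in full; the proofs are below) =====
def Claim_equal_min_removals_for_monotonic : Prop := ∀ (array : List Int), Dom_min_removals_for_monotonic array → Spec_min_removals_for_monotonic array (min_removals_for_monotonic array)

-- ===== LEMMAS AND PROOFS =====

-- The common semantic recurrence: for a "may precede" test cmp, pvPairs xs lists (value, L-value)
-- where L(i) = 1 + max{ L(j) | j < i, cmp xs[j] xs[i] } (0 if none): the classic LIS recurrence.
def pvMatch (cmp : Int → Int → Bool) (ps : List (Int × Nat)) (x : Int) : Nat :=
  ps.foldl (fun m p => if cmp p.1 x then max m p.2 else m) 0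

def pvStep (cmp : Int → Int → Bool) (acc : List (Int × Nat)) (x : Int) : List (Int × Nat) :=
  acc ++ [(x, pvMatch cmp acc x + 1)]

def pvPairs (cmp : Int → Int → Bool) (xs : List Int) : List (Int × Nat) :=
  xs.foldl (pvStep cmp) []

def pvMaxL (cmp : Int → Int → Bool) (xs : List Int) : Nat :=
  (pvPairs cmp xs).foldl (fun m p => max m p.2) 0

def cmpInc (a x : Int) : Bool := decide (a ≤ x)
def cmpDec (a x : Int) : Bool := decide (x ≤ a)

-- ---- generic facts about pvPairs / pvMatch / pvMaxL ----

theorem pvPairs_snoc (cmp : Int → Int → Bool) (xs : List Int) (x : Int) :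
    pvPairs cmp (xs ++ [x]) = pvPairs cmp xs ++ [(x, pvMatch cmp (pvPairs cmp xs) x + 1)] := by
  simp [pvPairs, List.foldl_append, pvStep]

theorem pvPairs_length (cmp : Int → Int → Bool) (xs : List Int) :
    (pvPairs cmp xs).length = xs.length := by
  induction xs using List.reverseRecOn with
  | nil => rfl
  | append_singleton xs x ih => simp [pvPairs_snoc, ih]

theorem pvPairs_firsts (cmp : Int → Int → Bool) (xs : List Int) :
    (pvPairs cmp xs).map Prod.fst = xs := by
  induction xs using List.reverseRecOn with
  | nil => rfl
  | append_singleton xs x ih => simp [pvPairs_snoc, ih]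

theorem pvMaxL_snoc (cmp : Int → Int → Bool) (xs : List Int) (x : Int) :
    pvMaxL cmp (xs ++ [x]) = max (pvMaxL cmp xs) (pvMatch cmp (pvPairs cmp xs) x + 1) := by
  simp [pvMaxL, pvPairs_snoc, List.foldl_append]

theorem foldl_max2_init_le {α : Type} (f : α → Nat) (ps : List α) (i : Nat) :
    i ≤ ps.foldl (fun m p => max m (f p)) i := by
  induction ps generalizing i with
  | nil => simp
  | cons q t ih => exact le_trans (le_max_left i (f q)) (ih _)

theorem foldl_max2_ge {α : Type} (f : α → Nat) (ps : List α) (i : Nat) (p : α) (hp : p ∈ ps) :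
    f p ≤ ps.foldl (fun m p => max m (f p)) i := by
  induction ps generalizing i with
  | nil => simp at hp
  | cons q t ih =>
    simp only [List.foldl_cons]
    rcases List.mem_cons.mp hp with rfl | h
    · exact le_trans (le_max_right i (f p)) (foldl_max2_init_le f t _)
    · exact ih _ h

theorem foldl_max2_le {α : Type} (f : α → Nat) (ps : List α) (i b : Nat) (hi : i ≤ b)
    (h : ∀ p ∈ ps, f p ≤ b) : ps.foldl (fun m p => max m (f p)) i ≤ b := by
  induction ps generalizing i with
  | nil => simpa
  | cons q t ih =>
    simp only [List.foldl_cons]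
    exact ih _ (max_le hi (h q (by simp))) (fun p hp => h p (by simp [hp]))

theorem pvMatch_eq_foldl_max (cmp : Int → Int → Bool) (ps : List (Int × Nat)) (x : Int) :
    pvMatch cmp ps x = ps.foldl (fun m p => max m (if cmp p.1 x then p.2 else 0)) 0 := by
  unfold pvMatch; congr 1; funext m p; by_cases h : cmp p.1 x <;> simp [h]

theorem pvMatch_ge (cmp : Int → Int → Bool) (ps : List (Int × Nat)) (x : Int) (p : Int × Nat)
    (hp : p ∈ ps) (hc : cmp p.1 x) : p.2 ≤ pvMatch cmp ps x := by
  rw [pvMatch_eq_foldl_max]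
  have := foldl_max2_ge (fun p : Int × Nat => if cmp p.1 x then p.2 else 0) ps 0 p hp
  simpa [hc] using this

theorem pvMatch_le (cmp : Int → Int → Bool) (ps : List (Int × Nat)) (x : Int) (b : Nat)
    (h : ∀ p ∈ ps, cmp p.1 x → p.2 ≤ b) : pvMatch cmp ps x ≤ b := by
  rw [pvMatch_eq_foldl_max]
  refine foldl_max2_le _ ps 0 b (Nat.zero_le b) (fun p hp => ?_)
  by_cases hc : cmp p.1 x <;> simp [hc, h p hp]

theorem pvMaxL_ge (cmp : Int → Int → Bool) (xs : List Int) (p : Int × Nat)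
    (hp : p ∈ pvPairs cmp xs) : p.2 ≤ pvMaxL cmp xs := by
  exact foldl_max2_ge (fun p : Int × Nat => p.2) (pvPairs cmp xs) 0 p hp

theorem getD_snoc_last (T : List Int) (x : Int) : (T ++ [x]).getD T.length 0 = x := by
  rw [List.getD_eq_getElem _ _ (by simp)]
  exact List.getElem_concat_length rfl _

theorem getD_set_self (T : List Int) (i : Nat) (x : Int) (h : i < T.length) :
    (T.set i x).getD i 0 = x := by
  rw [List.getD_eq_getElem _ _ (by simpa using h)]
  simp

theorem getD_set_ne (T : List Int) (i j : Nat) (x : Int) (h : i ≠ j) :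
    (T.set i x).getD j 0 = T.getD j 0 := by
  by_cases hj : j < T.length
  · rw [List.getD_eq_getElem _ _ (by simpa using hj), List.getD_eq_getElem _ _ hj]
    simp [h]
  · rw [List.getD_eq_default _ _ (by simpa using Nat.le_of_not_lt hj),
        List.getD_eq_default _ _ (Nat.le_of_not_lt hj)]

theorem pvMatch_negmap (ps : List (Int × Nat)) (x : Int) :
    pvMatch cmpInc (ps.map (fun p => (-p.1, p.2))) (-x) = pvMatch cmpDec ps x := by
  unfold pvMatch
  rw [List.foldl_map]
  congr 1
  funext m p
  have h : cmpInc (-p.1) (-x) = cmpDec p.1 x := by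
    simp only [cmpInc, cmpDec]
    rw [decide_eq_decide]
    omega
  simp [h]

theorem foldl_congr_mem' {α β : Type} (l : List α) (f g : β → α → β) (b : β)
    (h : ∀ b a, a ∈ l → f b a = g b a) : l.foldl f b = l.foldl g b := by
  induction l generalizing b with
  | nil => rfl
  | cons a t ih =>
    simp only [List.foldl_cons]
    rw [h b a (by simp)]
    exact ih _ (fun b a ha => h b a (by simp [ha]))

theorem getD_map' {α β : Type} (f : α → β) (ps : List α) (j : Nat) (d : α) :
    (ps.map f).getD j (f d) = f (ps.getD j d) := by
  rcases Nat.lt_or_ge j ps.length with h | h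
  · rw [List.getD_eq_getElem _ _ (by simpa using h), List.getD_eq_getElem _ _ h]
    simp
  · rw [List.getD_eq_default _ _ (by simpa using h), List.getD_eq_default _ _ h]

theorem getD_append_at {α : Type} (A l : List α) (d : α) :
    (A ++ l).getD A.length d = l.getD 0 d := by
  cases l with
  | nil => simp
  | cons a t =>
    rw [List.getD_eq_getElem _ _ (by simp)]
    rw [List.getElem_append_right (Nat.le_refl _)]
    simp

theorem set_append_at {α : Type} (A l : List α) (v : α) :
    (A ++ l).set A.length v = A ++ l.set 0 v := by
  rw [List.set_append]
  simp

theorem foldl_range_getD {α β : Type} (ps : List α) (g : β → α → β) (init : β) (d : α) :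
    (List.range ps.length).foldl (fun v j => g v (ps.getD j d)) init = ps.foldl g init := by
  induction ps using List.reverseRecOn generalizing init with
  | nil => simp
  | append_singleton qs a ih =>
    simp only [List.length_append, List.length_singleton, List.range_succ, List.foldl_append]
    rw [foldl_congr_mem' _ _ (fun v j => g v (qs.getD j d)) init
        (fun b j hj => by rw [List.getD_append _ _ _ _ (List.mem_range.mp hj)])]
    rw [ih]
    simp

theorem set_loop (i : Nat) (c : Nat → Bool) (dp : List Int) (hi : i < dp.length)
    (js : List Nat) (hjs : ∀ j ∈ js, j < i) :
    js.foldl (fun dp j => if c j then dp.set i (max (dp.getD i 0) (dp.getD j 0 + 1)) else dp) dp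
      = dp.set i (js.foldl (fun v j => if c j then max v (dp.getD j 0 + 1) else v) (dp.getD i 0)) := by
  induction js using List.reverseRecOn with
  | nil =>
    simp only [List.foldl_nil]
    rw [List.getD_eq_getElem _ _ hi, List.set_getElem_self]
  | append_singleton js j ih =>
    have hj : j < i := hjs j (by simp)
    have hjs' : ∀ j' ∈ js, j' < i := fun j' h => hjs j' (by simp [h])
    simp only [List.foldl_append, List.foldl_cons, List.foldl_nil]
    rw [ih hjs']
    by_cases hc : c j
    · simp only [hc, if_true]
      rw [getD_set_self _ _ _ hi, getD_set_ne _ _ _ _ (by omega), List.set_set]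
    · simp [hc]

theorem foldl_ifmax_cast (cmp : Int → Int → Bool) (x : Int) (ps : List (Int × Nat)) (m : Nat) :
    ps.foldl (fun (v : Int) p => if cmp p.1 x then max v ((p.2 : Int) + 1) else v) ((m : Int) + 1)
      = ((ps.foldl (fun m' p => if cmp p.1 x then max m' p.2 else m') m : Nat) : Int) + 1 := by
  induction ps generalizing m with
  | nil => simp
  | cons p t ih =>
    simp only [List.foldl_cons]
    by_cases hc : cmp p.1 x
    · simp only [hc, if_true]
      rw [show max ((m : Int) + 1) ((p.2 : Int) + 1) = ((max m p.2 : Nat) : Int) + 1 by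
        rw [Nat.cast_max]; omega]
      exact ih _
    · simp only [hc, Bool.false_eq_true, if_false]
      exact ih _

theorem foldl_ifmax_cast1 (cmp : Int → Int → Bool) (x : Int) (ps : List (Int × Nat)) :
    ps.foldl (fun (v : Int) p => if cmp p.1 x then max v ((p.2 : Int) + 1) else v) 1
      = ((ps.foldl (fun m' p => if cmp p.1 x then max m' p.2 else m') 0 : Nat) : Int) + 1 := by
  have h := foldl_ifmax_cast cmp x ps 0
  simpa using h

theorem foldl_max_cast (Lt : List Nat) (a : Nat) :
    (Lt.map ((↑·) : Nat → Int)).foldl max ((a : Nat) : Int) = ((Lt.foldl max a : Nat) : Int) := by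
  induction Lt generalizing a with
  | nil => rfl
  | cons l t ih =>
    simp only [List.map_cons, List.foldl_cons]
    rw [← Nat.cast_max]
    exact ih _

def pvInner (cmp : Int → Int → Bool) (xs : List Int) (i : Nat) (dp : List Int) : List Int :=
  (List.range i).foldl (fun dp j =>
    if cmp (pvIdx xs j) (pvIdx xs i) then
      dp.set i (max (dp.getD i 0) (dp.getD j 0 + 1))
    else dp) dp

def pvOuter (cmp : Int → Int → Bool) (xs : List Int) : List Int :=
  (List.range' 1 (xs.length - 1)).foldl (fun dp i => pvInner cmp xs i dp)
    (List.replicate xs.length (1 : Int))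

theorem outer_aux (cmp : Int → Int → Bool) (xs : List Int) (hx : xs ≠ []) (k : Nat)
    (hk : k ≤ xs.length - 1) :
    (List.range' 1 k).foldl (fun dp i => pvInner cmp xs i dp) (List.replicate xs.length 1)
      = (pvPairs cmp (xs.take (k + 1))).map (fun p => (p.2 : Int))
        ++ List.replicate (xs.length - (k + 1)) 1 := by
  have hn1 : 1 ≤ xs.length := List.length_pos_iff.mpr hx
  induction k with
  | zero =>
    obtain ⟨y, t, rfl⟩ := List.exists_cons_of_ne_nil hx
    simp only [List.range'_zero, List.foldl_nil, List.take_succ_cons, List.take_zero]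
    have h1 : pvPairs cmp [y] = [(y, 1)] := by simp [pvPairs, pvStep, pvMatch]
    rw [h1]
    simp [List.replicate_succ]
  | succ k ih =>
    have hk' : k ≤ xs.length - 1 := by omega
    have hkn : k + 1 < xs.length := by omega
    rw [List.range'_concat, List.foldl_append]
    rw [ih hk']
    simp only [List.foldl_cons, List.foldl_nil]
    have h1k : 1 + 1 * k = k + 1 := by omega
    rw [h1k]
    set ps1 := pvPairs cmp (xs.take (k + 1)) with hps1
    set A := ps1.map (fun p => (p.2 : Int)) with hA
    have hlenps1 : ps1.length = k + 1 := by
      rw [hps1, pvPairs_length, List.length_take]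
      omega
    have hlenA : A.length = k + 1 := by rw [hA, List.length_map]; exact hlenps1
    have hrep : xs.length - (k + 1) = (xs.length - (k + 2)) + 1 := by omega
    set dpk := A ++ List.replicate (xs.length - (k + 1)) (1 : Int) with hdpk
    have hlendp : dpk.length = xs.length := by
      rw [hdpk, List.length_append, List.length_replicate]
      omega
    have hi : k + 1 < dpk.length := by omega
    have hgetI : dpk.getD (k + 1) 0 = 1 := by
      rw [hdpk, ← hlenA, getD_append_at]
      rw [show xs.length - A.length = (xs.length - (k + 2)) + 1 by omega, List.replicate_succ]
      simp
    unfold pvInner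
    rw [set_loop (k + 1) _ dpk hi _ (fun j hj => List.mem_range.mp hj)]
    have hxj : ∀ j, j < k + 1 → dpk.getD j 0 = ((ps1.getD j (0, 0)).2 : Int) := by
      intro j hj
      have h1 := getD_map' (fun p : Int × Nat => (p.2 : Int)) ps1 j (0, 0)
      simp only [Nat.cast_zero] at h1
      rw [hdpk, List.getD_append _ _ _ _ (by omega), hA]
      exact h1
    have hfst : ∀ j, j < k + 1 → pvIdx xs j = (ps1.getD j (0, 0)).1 := by
      intro j hj
      have h1 := getD_map' Prod.fst ps1 j (0, 0)
      rw [show ps1.map Prod.fst = List.take (k + 1) xs from by rw [hps1, pvPairs_firsts]] at h1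
      rw [← h1]
      unfold pvIdx
      have hjlen : j < (List.take (k + 1) xs).length := by
        rw [List.length_take]; omega
      rw [List.getD_eq_getElem _ _ hjlen, List.getD_eq_getElem _ _ (by omega : j < xs.length)]
      exact List.getElem_take.symm
    rw [foldl_congr_mem' _ _
        (fun (v : Int) j => if cmp ((ps1.getD j (0, 0)).1) (pvIdx xs (k + 1)) then
          max v (((ps1.getD j (0, 0)).2 : Int) + 1) else v) _
        (fun v j hj => by
          rw [hfst j (List.mem_range.mp hj), hxj j (List.mem_range.mp hj)])]
    rw [hgetI, show List.range (k + 1) = List.range ps1.length from by rw [hlenps1]]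
    rw [foldl_range_getD ps1
        (fun (v : Int) p => if cmp p.1 (pvIdx xs (k + 1)) then max v ((p.2 : Int) + 1) else v) _ (0, 0)]
    rw [foldl_ifmax_cast1]
    have htake : xs.take (k + 2) = xs.take (k + 1) ++ [xs[k + 1]] := by
      rw [List.take_add_one, List.getElem?_eq_getElem hkn]
      rfl
    have hxnew : pvIdx xs (k + 1) = xs[k + 1] := List.getD_eq_getElem _ _ hkn
    rw [hdpk, ← hlenA, set_append_at, hlenA]
    rw [show xs.length - (k + 1) = (xs.length - (k + 2)) + 1 by omega, List.replicate_succ]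
    simp only [List.set_cons_zero]
    rw [htake, pvPairs_snoc, ← hps1, List.map_append, ← hA, ← hxnew]
    simp [pvMatch, List.append_assoc]

theorem pvOuter_eq (cmp : Int → Int → Bool) (xs : List Int) (hx : xs ≠ []) :
    pvOuter cmp xs = (pvPairs cmp xs).map (fun p => (p.2 : Int)) := by
  have hn1 : 1 ≤ xs.length := List.length_pos_iff.mpr hx
  unfold pvOuter
  rw [outer_aux cmp xs hx (xs.length - 1) (Nat.le_refl _)]
  have h1 : xs.length - 1 + 1 = xs.length := by omega
  rw [h1, List.take_length]
  simp

theorem maxval_of_outer (cmp : Int → Int → Bool) (xs : List Int) (hx : xs ≠ []) :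
    (PySem.List.max? (pvOuter cmp xs) (fun v => v)).getD 0 = (pvMaxL cmp xs : Int) := by
  rw [pvOuter_eq cmp xs hx]
  rw [show (pvPairs cmp xs).map (fun p => (p.2 : Int))
        = ((pvPairs cmp xs).map Prod.snd).map ((↑·) : Nat → Int) from by
      rw [List.map_map]; rfl]
  have hLs : (pvPairs cmp xs).map Prod.snd ≠ [] := by
    intro e
    have := congrArg List.length e
    rw [List.length_map, pvPairs_length] at this
    exact hx (List.eq_nil_of_length_eq_zero this)
  obtain ⟨L0, Lt, hL⟩ := List.exists_cons_of_ne_nil hLs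
  rw [hL, List.map_cons, PySem.List.max?_id_cons, Option.getD_some, foldl_max_cast]
  unfold pvMaxL
  rw [show (pvPairs cmp xs).foldl (fun m p => max m p.2) 0
        = ((pvPairs cmp xs).map Prod.snd).foldl max 0 from by rw [List.foldl_map]]
  rw [hL, List.foldl_cons, Nat.zero_max]

-- ---- B-side: patience sorting computes the max of the recurrence ----

def pvSortedLe (T : List Int) : Prop := ∀ m, m + 1 < T.length → T.getD m 0 ≤ T.getD (m + 1) 0

def pvInv (xs T : List Int) : Prop :=
  pvSortedLe T ∧ T.length = pvMaxL cmpInc xs ∧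
  ∀ m x, m < T.length →
    (T.getD m 0 ≤ x ↔ ∃ p ∈ pvPairs cmpInc xs, p.1 ≤ x ∧ m + 1 ≤ p.2)

theorem sorted_mono (T : List Int) (h : pvSortedLe T) (m m' : Nat) (hm : m ≤ m')
    (hm' : m' < T.length) : T.getD m 0 ≤ T.getD m' 0 := by
  induction m' with
  | zero => have : m = 0 := Nat.le_zero.mp hm; simp [this]
  | succ k ih =>
    rcases Nat.lt_or_ge m (k + 1) with hle | hge
    · exact le_trans (ih (Nat.lt_succ_iff.mp hle) (by omega)) (h k hm')
    · have : m = k + 1 := by omega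
      simp [this]

theorem sorted_countP_iff (T : List Int) (h : pvSortedLe T) (x : Int) (m : Nat)
    (hm : m < T.length) :
    (T.getD m 0 ≤ x ↔ m < T.countP (fun v => decide (v ≤ x))) := by
  induction T generalizing m with
  | nil => simp at hm
  | cons a t ih =>
    have hst : pvSortedLe t := fun k hk => by
      have := h (k + 1) (by simpa using Nat.succ_lt_succ hk)
      simpa [List.getD_cons_succ] using this
    have hhead : ∀ k, k < t.length → a ≤ t.getD k 0 := fun k hk => by
      have := sorted_mono (a :: t) h 0 (k + 1) (Nat.zero_le _) (by simpa using Nat.succ_lt_succ hk)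
      simpa [List.getD_cons_succ] using this
    cases m with
    | zero =>
      simp only [List.getD_cons_zero, List.countP_cons]
      constructor
      · intro hax; simp [hax]
      · intro hcnt
        by_contra hax
        have ht0 : t.countP (fun v => decide (v ≤ x)) = 0 := by
          rw [List.countP_eq_zero]
          intro b hb
          obtain ⟨k, hk, rfl⟩ := List.mem_iff_getElem.mp hb
          have := hhead k hk
          rw [List.getD_eq_getElem t 0 hk] at this
          simp only [decide_eq_true_eq]
          omega
        simp [hax, ht0] at hcnt
    | succ m =>
      simp only [List.getD_cons_succ, List.countP_cons]
      have hm' : m < t.length := by simpa using Nat.lt_of_succ_lt_succ hm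
      by_cases hax : a ≤ x
      · rw [ih hst m hm']
        simp [hax]
      · have ht0 : t.countP (fun v => decide (v ≤ x)) = 0 := by
          rw [List.countP_eq_zero]
          intro b hb
          obtain ⟨k, hk, rfl⟩ := List.mem_iff_getElem.mp hb
          have := hhead k hk
          rw [List.getD_eq_getElem t 0 hk] at this
          simp only [decide_eq_true_eq]
          omega
        have hgem : a ≤ t.getD m 0 := hhead m hm'
        rw [ht0]
        simp only [hax, decide_false]
        constructor
        · intro hc; omega
        · intro hc; simp at hc

theorem pvTails_snoc (xs : List Int) (x : Int) :
    pvTails (xs ++ [x]) =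
      (if pvBisectRight (pvTails xs) x = (pvTails xs).length
       then pvTails xs ++ [x]
       else (pvTails xs).set (pvBisectRight (pvTails xs) x) x) := by
  simp [pvTails, List.foldl_append]

theorem cnt_eq (xs T : List Int) (inv : pvInv xs T) (x : Int) :
    T.countP (fun v => decide (v ≤ x)) = pvMatch cmpInc (pvPairs cmpInc xs) x := by
  obtain ⟨hs, hlen, hiff⟩ := inv
  set cnt := T.countP (fun v => decide (v ≤ x)) with hcnt
  have hcl : cnt ≤ T.length := List.countP_le_length
  apply Nat.le_antisymm
  · cases hc0 : cnt with
    | zero => exact Nat.zero_le _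
    | succ k =>
      have hklen : k < T.length := by omega
      have hgk : T.getD k 0 ≤ x := (sorted_countP_iff T hs x k hklen).mpr (by omega)
      obtain ⟨p, hp, h1, h2⟩ := (hiff k x hklen).mp hgk
      calc k + 1 ≤ p.2 := h2
        _ ≤ pvMatch cmpInc (pvPairs cmpInc xs) x :=
            pvMatch_ge _ _ _ p hp (by simp [cmpInc, h1])
  · apply pvMatch_le
    intro p hp hc
    by_contra hgt
    have h2 : cnt + 1 ≤ p.2 := by omega
    by_cases hlt : cnt < T.length
    · have : T.getD cnt 0 ≤ x :=
        (hiff cnt x hlt).mpr ⟨p, hp, by simpa [cmpInc] using hc, h2⟩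
      have := (sorted_countP_iff T hs x cnt hlt).mp this
      omega
    · have := pvMaxL_ge cmpInc xs p hp
      omega

theorem pvInv_main (xs : List Int) : pvInv xs (pvTails xs) := by
  induction xs using List.reverseRecOn with
  | nil =>
    refine ⟨fun m hm => by simp [pvTails] at hm, by simp [pvTails, pvMaxL, pvPairs], ?_⟩
    intro m x hm; simp [pvTails] at hm
  | append_singleton xs x ih =>
    obtain ⟨hs, hlen, hiff⟩ := ih
    set T := pvTails xs with hT
    set ps := pvPairs cmpInc xs with hps
    set cnt := pvBisectRight T x with hcntdef
    have hcntP : cnt = T.countP (fun v => decide (v ≤ x)) := rfl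
    have hcl : cnt ≤ T.length := by rw [hcntP]; exact List.countP_le_length
    have hidx : ∀ m, m < T.length → (T.getD m 0 ≤ x ↔ m < cnt) := by
      intro m hm; rw [hcntP]; exact sorted_countP_iff T hs x m hm
    have hmatch : pvMatch cmpInc ps x = cnt := by
      rw [hcntP]; exact (cnt_eq xs T ⟨hs, hlen, hiff⟩ x).symm
    have hpairs' : pvPairs cmpInc (xs ++ [x]) = ps ++ [(x, cnt + 1)] := by
      rw [pvPairs_snoc, hmatch]
    have hmax' : pvMaxL cmpInc (xs ++ [x]) = max T.length (cnt + 1) := by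
      rw [pvMaxL_snoc, hmatch, hlen]
    rw [pvTails_snoc, ← hT]
    by_cases hfull : cnt = T.length
    · -- append case
      rw [if_pos (by rw [← hcntdef]; exact hfull)]
      refine ⟨?_, ?_, ?_⟩
      · intro m hm
        simp only [List.length_append, List.length_singleton] at hm
        by_cases hm1 : m + 1 < T.length
        · rw [List.getD_append _ _ _ _ (by omega), List.getD_append _ _ _ _ hm1]
          exact hs m hm1
        · have hmeq : m + 1 = T.length := by omega
          rw [List.getD_append _ _ _ _ (by omega), hmeq, getD_snoc_last]
          exact (hidx m (by omega)).mpr (by omega)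
      · rw [hmax']; simp; omega
      · intro m x' hm
        simp only [List.length_append, List.length_singleton] at hm
        rw [hpairs']
        by_cases hmlt : m < T.length
        · rw [List.getD_append _ _ _ _ hmlt]
          constructor
          · intro hx
            obtain ⟨p, hp, h1, h2⟩ := (hiff m x' hmlt).mp hx
            exact ⟨p, List.mem_append_left _ hp, h1, h2⟩
          · rintro ⟨p, hp, h1, h2⟩
            rcases List.mem_append.mp hp with hold | hnew
            · exact (hiff m x' hmlt).mpr ⟨p, hold, h1, h2⟩
            · simp only [List.mem_singleton] at hnew
              subst hnew
              have : T.getD m 0 ≤ x := (hidx m hmlt).mpr (by omega)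
              exact le_trans this h1
        · have hmeq : m = T.length := by omega
          rw [hmeq, getD_snoc_last]
          constructor
          · intro hx
            exact ⟨(x, cnt + 1), List.mem_append_right _ (by simp), hx, by omega⟩
          · rintro ⟨p, hp, h1, h2⟩
            rcases List.mem_append.mp hp with hold | hnew
            · have := pvMaxL_ge cmpInc xs p hold
              rw [← hlen] at this
              omega
            · simp only [List.mem_singleton] at hnew
              subst hnew
              exact h1
    · -- set case
      rw [if_neg (by rw [← hcntdef]; exact hfull)]
      have hclt : cnt < T.length := by omega
      have hxlt : x < T.getD cnt 0 := by
        by_contra hge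
        have := (hidx cnt hclt).mp (by omega)
        omega
      refine ⟨?_, ?_, ?_⟩
      · intro m hm
        rw [List.length_set] at hm
        rcases Nat.lt_trichotomy cnt m with h1 | h1 | h1
        · rw [getD_set_ne _ _ _ _ (by omega), getD_set_ne _ _ _ _ (by omega)]
          exact hs m hm
        · -- cnt = m
          rw [← h1, getD_set_self _ _ _ (by omega), getD_set_ne _ _ _ _ (by omega)]
          have := hs cnt (by omega)
          omega
        · by_cases h2 : cnt = m + 1
          · rw [← h2, getD_set_self _ _ _ (by omega), getD_set_ne _ _ _ _ (by omega)]
            have : T.getD m 0 ≤ x := (hidx m (by omega)).mpr (by omega)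
            exact this
          · rw [getD_set_ne _ _ _ _ (by omega), getD_set_ne _ _ _ _ (by omega)]
            exact hs m hm
      · rw [List.length_set, hmax']; omega
      · intro m x' hm
        rw [List.length_set] at hm
        rw [hpairs']
        rcases Nat.lt_trichotomy m cnt with h1 | h1 | h1
        · rw [getD_set_ne _ _ _ _ (by omega)]
          constructor
          · intro hx
            obtain ⟨p, hp, ha, hb⟩ := (hiff m x' hm).mp hx
            exact ⟨p, List.mem_append_left _ hp, ha, hb⟩
          · rintro ⟨p, hp, ha, hb⟩
            rcases List.mem_append.mp hp with hold | hnew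
            · exact (hiff m x' hm).mpr ⟨p, hold, ha, hb⟩
            · simp only [List.mem_singleton] at hnew
              subst hnew
              have : T.getD m 0 ≤ x := (hidx m hm).mpr (by omega)
              exact le_trans this ha
        · rw [h1, getD_set_self _ _ _ hclt]
          constructor
          · intro hx
            exact ⟨(x, cnt + 1), List.mem_append_right _ (by simp), hx, by omega⟩
          · rintro ⟨p, hp, ha, hb⟩
            rcases List.mem_append.mp hp with hold | hnew
            · have : T.getD cnt 0 ≤ x' := (hiff cnt x' hclt).mpr ⟨p, hold, ha, by omega⟩
              omega
            · simp only [List.mem_singleton] at hnew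
              subst hnew
              exact ha
        · rw [getD_set_ne _ _ _ _ (by omega)]
          constructor
          · intro hx
            obtain ⟨p, hp, ha, hb⟩ := (hiff m x' hm).mp hx
            exact ⟨p, List.mem_append_left _ hp, ha, hb⟩
          · rintro ⟨p, hp, ha, hb⟩
            rcases List.mem_append.mp hp with hold | hnew
            · exact (hiff m x' hm).mpr ⟨p, hold, ha, hb⟩
            · simp only [List.mem_singleton] at hnew
              subst hnew
              omega

theorem pvLnds_eq (xs : List Int) : pvLnds xs = pvMaxL cmpInc xs := by
  have h := (pvInv_main xs).2.1
  simpa [pvLnds] using h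

-- ---- the non-increasing side via negation ----

theorem pvPairs_neg (xs : List Int) :
    pvPairs cmpInc (xs.map (fun v => -v)) = (pvPairs cmpDec xs).map (fun p => (-p.1, p.2)) := by
  induction xs using List.reverseRecOn with
  | nil => rfl
  | append_singleton xs x ih =>
    rw [List.map_append, List.map_singleton, pvPairs_snoc, pvPairs_snoc, ih, pvMatch_negmap]
    simp

theorem pvMaxL_neg (xs : List Int) :
    pvMaxL cmpInc (xs.map (fun v => -v)) = pvMaxL cmpDec xs := by
  unfold pvMaxL
  rw [pvPairs_neg, List.foldl_map]

theorem portA_eq (array : List Int) (h : ¬ array.length ≤ 1) :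
    min_removals_for_monotonic array
      = (array.length : Int) -
          max ((pvMaxL cmpInc array : Nat) : Int) ((pvMaxL cmpDec array : Nat) : Int) := by
  have hx : array ≠ [] := by
    intro e
    subst e
    simp at h
  have hfun_inc : (fun (dp : List Int) (i : Nat) => (List.range i).foldl (fun dp j =>
        if pvIdx array i ≥ pvIdx array j then
          dp.set i (max (dp.getD i 0) (dp.getD j 0 + 1)) else dp) dp)
      = fun dp i => pvInner cmpInc array i dp := by
    funext dp i
    unfold pvInner
    apply foldl_congr_mem'
    intro b j _
    by_cases hc : pvIdx array j ≤ pvIdx array i <;> simp [ge_iff_le, hc, cmpInc]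
  have hfun_dec : (fun (dp : List Int) (i : Nat) => (List.range i).foldl (fun dp j =>
        if pvIdx array i ≤ pvIdx array j then
          dp.set i (max (dp.getD i 0) (dp.getD j 0 + 1)) else dp) dp)
      = fun dp i => pvInner cmpDec array i dp := by
    funext dp i
    unfold pvInner
    apply foldl_congr_mem'
    intro b j _
    by_cases hc : pvIdx array i ≤ pvIdx array j <;> simp [hc, cmpDec]
  have hOuter_inc : (List.range' 1 (array.length - 1)).foldl
      (fun (dp : List Int) (i : Nat) => (List.range i).foldl (fun dp j =>
        if pvIdx array i ≥ pvIdx array j then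
          dp.set i (max (dp.getD i 0) (dp.getD j 0 + 1)) else dp) dp)
      (List.replicate array.length (1 : Int)) = pvOuter cmpInc array := by
    unfold pvOuter
    rw [hfun_inc]
  have hOuter_dec : (List.range' 1 (array.length - 1)).foldl
      (fun (dp : List Int) (i : Nat) => (List.range i).foldl (fun dp j =>
        if pvIdx array i ≤ pvIdx array j then
          dp.set i (max (dp.getD i 0) (dp.getD j 0 + 1)) else dp) dp)
      (List.replicate array.length (1 : Int)) = pvOuter cmpDec array := by
    unfold pvOuter
    rw [hfun_dec]
  simp only [min_removals_for_monotonic]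
  rw [if_neg h]
  rw [hOuter_inc, hOuter_dec, maxval_of_outer cmpInc array hx, maxval_of_outer cmpDec array hx]

-- ===== VERDICT (by name: the statement is the Claim_ definition above) =====
theorem min_removals_for_monotonic_spec : Claim_equal_min_removals_for_monotonic := by
  unfold Claim_equal_min_removals_for_monotonic
  intro array _
  unfold Spec_min_removals_for_monotonic min_removals_for_monotonic_alt
  by_cases h1 : array.length ≤ 1
  · rw [show min_removals_for_monotonic array = 0 from by
      unfold min_removals_for_monotonic; rw [if_pos h1]]
    match array with
    | [] => simp
    | a :: t =>
      have ht : t = [] := by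
        simp only [List.length_cons] at h1
        exact List.eq_nil_of_length_eq_zero (by omega)
      subst ht
      rw [if_neg (by simp)]
      rw [pvLnds_eq, pvLnds_eq]
      have h2 : pvMaxL cmpInc [a] = 1 := by simp [pvMaxL, pvPairs, pvStep, pvMatch]
      have h3 : pvMaxL cmpInc [-a] = 1 := by simp [pvMaxL, pvPairs, pvStep, pvMatch]
      simp only [List.map_cons, List.map_nil, List.length_cons, List.length_nil, h2, h3]
      norm_num
  · rw [portA_eq array h1]
    rw [if_neg (by omega : ¬ array.length = 0)]
    rw [pvLnds_eq, pvLnds_eq, pvMaxL_neg, Nat.cast_max]
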